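-- pv_equiv track=rewrite | github.com/francojc/easel | easel/output/columns.py | parse_include_columns
-- ===== SOURCE A (Python) =====
-- from typing import Dict, List, Set, Optional, Any, Union
--
-- def parse_include_columns(include_args: tuple[str, ...]) -> List[str]:
--     """Parse --include arguments into column names.
--
--     Args:
--         include_args: Tuple of include arguments from CLI
--
--     Returns:
--         List of column names to include
--     """
--     columns = []
--
--     for arg in include_args:
--         # Handle comma-separated values
--         if ',' in arg:
--             columns.extend([col.strip() for col in arg.split(',')])
--         else:
--             columns.append(arg.strip())
--
--     return columns
-- ===== SOURCE B (Python) =====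
-- def parse_include_columns(include_args):
--     """Parse --include arguments into column names."""
--     if not include_args:
--         return []
--     return [col.strip() for col in ",".join(include_args).split(",")]
-- ===== Notes on version B (the rewrite author's own statement) =====
-- stated objective: simpler
-- what changed: Replaces the per-argument branch-and-split loop by one join of all arguments with ',' followed by a single split and strip pass (empty input guarded).
import Mathlib
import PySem

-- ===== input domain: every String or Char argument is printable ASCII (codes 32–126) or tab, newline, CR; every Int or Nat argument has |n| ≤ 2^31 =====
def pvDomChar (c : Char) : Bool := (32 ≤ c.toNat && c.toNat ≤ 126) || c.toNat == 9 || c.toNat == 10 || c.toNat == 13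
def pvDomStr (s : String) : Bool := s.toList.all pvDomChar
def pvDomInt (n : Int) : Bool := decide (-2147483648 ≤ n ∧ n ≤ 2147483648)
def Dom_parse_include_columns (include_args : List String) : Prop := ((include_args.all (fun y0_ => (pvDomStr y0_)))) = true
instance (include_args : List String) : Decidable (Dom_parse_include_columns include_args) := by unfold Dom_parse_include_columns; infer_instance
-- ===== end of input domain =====

-- B joins all arguments with ',' and does a single split+strip pass instead of A's per-argument branch-and-split loop (simpler decomposition; same cost).
-- ===== PORT A =====
def parse_include_columns (include_args : List String) : List String :=
  include_args.foldl (fun columns arg =>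
    if PySem.Str.isIn "," arg then
      columns ++ List.map PySem.Str.strip ((PySem.Str.split? arg ",").getD [])
    else
      columns ++ [PySem.Str.strip arg]) []

-- ===== PORT B =====
def parse_include_columns_alt (include_args : List String) : List String :=
  if include_args.isEmpty then []
  else List.map PySem.Str.strip ((PySem.Str.split? (PySem.Str.join "," include_args) ",").getD [])

-- ===== PRECONDITION & SPEC =====
def Spec_parse_include_columns (include_args : List String) (out : List String) : Prop := out = parse_include_columns_alt include_args
instance (include_args : List String) (out : List String) : Decidable (Spec_parse_include_columns include_args out) := by unfold Spec_parse_include_columns; infer_instance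

-- ===== CLAIM (what is proved, stated in full; the proofs are below) =====
def Claim_equal_parse_include_columns : Prop := ∀ (include_args : List String), Dom_parse_include_columns include_args → Spec_parse_include_columns include_args (parse_include_columns include_args)

-- ===== LEMMAS AND PROOFS =====

-- ===== VERDICT (by name: the statement is the Claim_ definition above) =====
theorem pvSplitOn_cons (c x : Char) (rest : List Char) :
    List.splitOn c (x :: rest) = if x == c then [] :: List.splitOn c rest
      else (List.splitOn c rest).modifyHead (x :: ·) := by
  simp only [List.splitOn, List.splitOnP_cons]

theorem pvSplitOnP_ne_nil (p : Char → Bool) (l : List Char) : List.splitOnP p l ≠ [] := by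
  induction l with
  | nil => simp [List.splitOnP_nil]
  | cons x rest ih =>
    rw [List.splitOnP_cons]
    split_ifs
    · simp
    · rcases hr : List.splitOnP p rest with _ | ⟨hd, tl⟩
      · exact absurd hr ih
      · simp

theorem pvSplitOn_ne_nil (c : Char) (l : List Char) : List.splitOn c l ≠ [] :=
  pvSplitOnP_ne_nil _ l

-- go with enough fuel computes List.splitOn on a one-char separator
theorem pvGoChar (c : Char) : ∀ (fuel : Nat) (l cur : List Char) (acc : List (List Char)), l.length < fuel →
    PySem.Chars.splitOn.go [c] fuel l cur acc
      = acc.reverse ++ (List.splitOn c l).modifyHead (cur.reverse ++ ·) := by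
  intro fuel
  induction fuel with
  | zero => intro l cur acc h; omega
  | succ fuel ih =>
    intro l cur acc h
    cases l with
    | nil =>
      simp [PySem.Chars.splitOn.go, List.splitOn, List.splitOnP_nil]
    | cons x rest =>
      by_cases hx : x = c
      · subst hx
        rw [show PySem.Chars.splitOn.go [x] (fuel+1) (x :: rest) cur acc
              = PySem.Chars.splitOn.go [x] fuel (List.drop 1 (x :: rest)) [] (cur.reverse :: acc) from by
            simp [PySem.Chars.splitOn.go]]
        rw [ih _ _ _ (by simpa using h)]
        rcases hsp : List.splitOn x rest with _ | ⟨hd, tl⟩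
        · exact absurd hsp (pvSplitOn_ne_nil x rest)
        · simp [pvSplitOn_cons, hsp]
      · rw [show PySem.Chars.splitOn.go [c] (fuel+1) (x :: rest) cur acc
              = PySem.Chars.splitOn.go [c] fuel rest (x :: cur) acc from by
            have hcx : ¬ c = x := fun h => hx h.symm
            simp [PySem.Chars.splitOn.go, List.isPrefixOf, hcx]]
        rw [ih _ _ _ (by simpa using h)]
        rcases hsp : List.splitOn c rest with _ | ⟨hd, tl⟩
        · exact absurd hsp (pvSplitOn_ne_nil c rest)
        · simp [pvSplitOn_cons, hsp, hx]

theorem pvSplitOnChar (c : Char) (l : List Char) :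
    PySem.Chars.splitOn l [c] = List.splitOn c l := by
  rw [PySem.Chars.splitOn, pvGoChar c (l.length + 1) l [] [] (by omega)]
  rcases List.splitOn c l with _ | ⟨hd, tl⟩ <;> simp

theorem pvSplitOn_append (c : Char) (a b : List Char) :
    List.splitOn c (a ++ c :: b) = List.splitOn c a ++ List.splitOn c b := by
  induction a with
  | nil => simp [List.splitOn, List.splitOnP_nil]
  | cons x a' ih =>
    rw [List.cons_append, pvSplitOn_cons, pvSplitOn_cons, ih]
    by_cases hx : x = c
    · simp [hx]
    · rcases hsp : List.splitOn c a' with _ | ⟨hd, tl⟩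
      · exact absurd hsp (pvSplitOn_ne_nil c a')
      · simp [hx]

theorem pvSplitOn_of_not_mem (c : Char) (a : List Char) (h : c ∉ a) :
    List.splitOn c a = [a] := by
  induction a with
  | nil => simp [List.splitOn, List.splitOnP_nil]
  | cons x a' ih =>
    have hx : x ≠ c := fun hxc => h (hxc ▸ List.mem_cons_self)
    rw [pvSplitOn_cons, ih (fun hm => h (List.mem_cons_of_mem _ hm))]
    simp [hx]

theorem pvSplitOn_intercalate (c : Char) (x : List Char) (xs : List (List Char)) :
    List.splitOn c (List.intercalate [c] (x :: xs))
      = (x :: xs).flatMap (List.splitOn c) := by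
  induction xs generalizing x with
  | nil => simp [List.intercalate]
  | cons y ys ih =>
    rw [show List.intercalate [c] (x :: y :: ys) = x ++ c :: List.intercalate [c] (y :: ys) from by
          simp [List.intercalate, List.intersperse]]
    rw [pvSplitOn_append, ih y]
    simp

-- what A appends for one argument, in normalised form
theorem pvArgStep (arg : String) :
    (if PySem.Str.isIn "," arg then
        List.map PySem.Str.strip ((PySem.Str.split? arg ",").getD [])
      else [PySem.Str.strip arg])
      = List.map (fun cs => PySem.Str.strip (String.ofList cs)) (List.splitOn ',' arg.toList) := by
  have hsplit : PySem.Str.split? arg ","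
      = some (List.map String.ofList (List.splitOn ',' arg.toList)) := by
    simp [PySem.Str.split?, PySem.Chars.split?, pvSplitOnChar]
  have hiff : PySem.Str.isIn "," arg = PySem.Chars.isIn [','] arg.toList := by
    rw [PySem.Str.isIn_eq]
    rfl
  by_cases hin : PySem.Chars.isIn [','] arg.toList = true
  · rw [hiff, if_pos hin, hsplit]
    simp [Function.comp]
  · have hmem : ',' ∉ arg.toList := fun hc =>
      (PySem.Chars.isIn_eq_false_iff _ _).mp (Bool.eq_false_iff.mpr hin)
        ((List.singleton_infix_iff _ _).mpr hc)
    rw [hiff, if_neg hin, pvSplitOn_of_not_mem _ _ hmem]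
    simp [String.ofList_toList]

theorem parse_include_columns_spec : Claim_equal_parse_include_columns := by
  intro include_args _
  unfold Spec_parse_include_columns parse_include_columns parse_include_columns_alt
  have hstep : (fun (columns : List String) (arg : String) =>
      if PySem.Str.isIn "," arg then
        columns ++ List.map PySem.Str.strip ((PySem.Str.split? arg ",").getD [])
      else columns ++ [PySem.Str.strip arg])
      = fun columns arg => columns ++
          List.map (fun cs => PySem.Str.strip (String.ofList cs)) (List.splitOn ',' arg.toList) := by
    funext columns arg
    rw [← pvArgStep arg]
    split_ifs <;> rfl
  rw [hstep, PySem.List.foldl_append_eq_flatMap]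
  cases include_args with
  | nil => simp
  | cons a rest =>
    have hsplit : PySem.Str.split? (PySem.Str.join "," (a :: rest)) ","
        = some (List.map String.ofList
            (List.splitOn ',' (PySem.Str.join "," (a :: rest)).toList)) := by
      simp [PySem.Str.split?, PySem.Chars.split?, pvSplitOnChar]
    rw [show (a :: rest).isEmpty = false from rfl]
    simp only [Bool.false_eq_true, if_false, hsplit, Option.getD_some]
    rw [PySem.Str.toList_join]
    have hjoin : PySem.Chars.join (String.toList ",") (List.map String.toList (a :: rest))
        = List.intercalate [','] (List.map String.toList (a :: rest)) := rfl
    rw [hjoin, show List.map String.toList (a :: rest) = a.toList :: rest.map String.toList from rfl,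
        pvSplitOn_intercalate]
    simp only [List.map_map, List.map_flatMap, List.flatMap_map, Function.comp_def, List.nil_append, List.flatMap_cons, List.map_append]
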